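-- pv_equiv track=rewrite | github.com/bacor/ULL | project2/src/Get_Input_Reverse.py | vocab_to_indices
-- ===== SOURCE A (Python) =====
-- def vocab_to_indices(corpus):
--     indices = {}
--     index = 0
--     for story in corpus:
--         for text in story:
--             for word in text:
--                 if not word in indices:
--                     indices[word] = index
--                     index += 1
--     return indices
-- ===== SOURCE B (Python) =====
-- def vocab_to_indices(corpus):
--     words = [w for story in corpus for text in story for w in text]
--     first = {}
--     for pos, w in reversed(list(enumerate(words))):
--         first[w] = pos
--     order = sorted(first, key=first.get)
--     return {w: i for i, w in enumerate(order)}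
-- ===== Notes on version B (the rewrite author's own statement) =====
-- stated objective: alternative
-- what changed: Replaces A's single interleaved membership-check-plus-counter pass with a sort-based pipeline: flatten the corpus, record each word's first-occurrence position by a backwards last-write-wins scan over reversed(enumerate(words)), sort the distinct words by that position, and enumerate the sorted order to assign indices.
import Mathlib
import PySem

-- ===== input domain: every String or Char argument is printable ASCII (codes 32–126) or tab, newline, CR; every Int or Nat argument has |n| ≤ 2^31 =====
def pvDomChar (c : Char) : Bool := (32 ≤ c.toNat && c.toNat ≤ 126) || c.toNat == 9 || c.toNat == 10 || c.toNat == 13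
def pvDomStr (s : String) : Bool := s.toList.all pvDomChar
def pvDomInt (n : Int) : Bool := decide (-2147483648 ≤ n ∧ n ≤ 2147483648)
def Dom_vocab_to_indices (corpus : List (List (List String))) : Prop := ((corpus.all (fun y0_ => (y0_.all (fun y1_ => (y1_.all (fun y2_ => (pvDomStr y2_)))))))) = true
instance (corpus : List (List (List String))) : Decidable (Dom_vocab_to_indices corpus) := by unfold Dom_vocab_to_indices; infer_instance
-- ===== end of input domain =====

-- B replaces A's single interleaved membership-check-plus-counter pass by a sort-based pipeline: flatten, record each word's first position by a backwards last-write-wins scan, sort the words by that position, enumerate ranks; objective: alternative.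

-- ===== PORT A =====
-- the single interleaved pass: a dict and a running counter over the triple-nested loops
def vocab_to_indices (corpus : List (List (List String))) : List (String × Int) :=
  let st := corpus.foldl (fun st story =>
    story.foldl (fun st text =>
      text.foldl (fun st word =>
        if st.1.contains word then st else (st.1.insert word st.2, st.2 + 1)) st) st)
    ((PySem.Dict.empty : PySem.Dict String Int), (0 : Int))
  st.1.items

-- ===== PORT B =====
-- flatten; backwards scan storing positions (last write = first occurrence); sort keys by position; enumerate
def vocab_to_indices_alt (corpus : List (List (List String))) : List (String × Int) :=
  let words := corpus.flatMap (fun story => story.flatMap (fun text => text))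
  let first := ((PySem.List.enumerate words 0).reverse).foldl
      (fun d p => d.insert p.2 p.1) (PySem.Dict.empty : PySem.Dict String Int)
  let order := PySem.List.sorted first.keys (fun w => (first.get? w).getD 0) false
  (PySem.List.enumerate order 0).map (fun p => (p.2, p.1))

-- ===== PRECONDITION & SPEC =====
def Spec_vocab_to_indices (corpus : List (List (List String))) (out : List (String × Int)) : Prop := out = vocab_to_indices_alt corpus
instance (corpus : List (List (List String))) (out : List (String × Int)) : Decidable (Spec_vocab_to_indices corpus out) := by unfold Spec_vocab_to_indices; infer_instance

-- ===== CLAIM =====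
def Claim_equal_vocab_to_indices : Prop := ∀ (corpus : List (List (List String))), Dom_vocab_to_indices corpus → Spec_vocab_to_indices corpus (vocab_to_indices corpus)

-- ===== LEMMAS AND PROOFS =====

-- A-side: the dict holding the words of `pre` with indices 0,1,2,…
def pvD (pre : List String) : PySem.Dict String Int :=
  PySem.Dict.mk ((PySem.List.enumerate pre 0).map (fun p => (p.2, p.1)))

-- A's loop step over one word
def pvStep (st : PySem.Dict String Int × Int) (word : String) : PySem.Dict String Int × Int :=
  if st.1.contains word then st else (st.1.insert word st.2, st.2 + 1)

theorem pvD_keys (pre : List String) : (pvD pre).keys = pre := by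
  simp only [pvD, PySem.Dict.keys_mk, List.map_map]
  have : ((fun x => x.1) ∘ fun (p : Int × String) => (p.2, p.1)) = (fun p => p.2) := rfl
  rw [this, PySem.List.map_snd_enumerate]

theorem pvD_contains (pre : List String) (w : String) :
    (pvD pre).contains w = decide (w ∈ pre) := by
  rw [PySem.Dict.contains_eq_decide_mem_keys, pvD_keys]

theorem pvFold_invariant (words : List String) (pre : List String) :
    words.foldl pvStep (pvD pre, (pre.length : Int)) =
      (pvD (PySem.Set.update pre words), ((PySem.Set.update pre words).length : Int)) := by
  induction words generalizing pre with
  | nil => simp [PySem.Set.update]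
  | cons w ws ih =>
    rw [List.foldl_cons]
    by_cases hw : w ∈ pre
    · have hstep : pvStep (pvD pre, (pre.length : Int)) w = (pvD pre, (pre.length : Int)) := by
        simp [pvStep, pvD_contains, hw]
      rw [hstep, ih]
      simp [PySem.Set.update, PySem.Set.add, PySem.Set.contains, hw]
    · have hstep : pvStep (pvD pre, (pre.length : Int)) w
          = (pvD (pre ++ [w]), ((pre ++ [w]).length : Int)) := by
        simp only [pvStep, pvD_contains, hw, decide_false, Bool.false_eq_true, if_false]
        refine Prod.ext ?_ ?_
        · apply PySem.Dict.ext
          rw [PySem.Dict.items_insert_of_not_contains]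
          · simp [pvD, PySem.List.enumerate_append]
          · rw [pvD_contains]; simp [hw]
        · simp
      rw [hstep, ih]
      simp [PySem.Set.update, PySem.Set.add, PySem.Set.contains, hw]

theorem pvFold_flatten (corpus : List (List (List String))) (st : PySem.Dict String Int × Int) :
    corpus.foldl (fun st story =>
        story.foldl (fun st text => text.foldl pvStep st) st) st
      = (corpus.flatMap (fun story => story.flatMap (fun text => text))).foldl pvStep st := by
  induction corpus generalizing st with
  | nil => rfl
  | cons story rest ih =>
    rw [List.foldl_cons, List.flatMap_cons, List.foldl_append, ih]
    congr 1
    induction story generalizing st with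
    | nil => rfl
    | cons text ts iht =>
      rw [List.foldl_cons, List.flatMap_cons, List.foldl_append, iht]

-- B-side: the backwards scan, with a generalized starting position n
def pvF (ws : List String) (n : Int) : PySem.Dict String Int :=
  ((PySem.List.enumerate ws n).reverse).foldl (fun d p => d.insert p.2 p.1) PySem.Dict.empty

theorem pvF_cons (w : String) (ws : List String) (n : Int) :
    pvF (w :: ws) n = (pvF ws (n + 1)).insert w n := by
  simp [pvF, PySem.List.enumerate_cons, List.foldl_append]

theorem pvF_get? (ws : List String) (n : Int) (x : String) :
    (pvF ws n).get? x = if x ∈ ws then some (n + (ws.idxOf x : Int)) else none := by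
  induction ws generalizing n with
  | nil => simp [pvF, PySem.List.enumerate_nil, PySem.Dict.get?_empty]
  | cons w ws ih =>
    rw [pvF_cons, PySem.Dict.get?_insert]
    by_cases hx : x = w
    · subst hx; simp [List.idxOf_cons_self]
    · rw [if_neg hx, ih]
      by_cases hm : x ∈ ws
      · have : (w :: ws).idxOf x = ws.idxOf x + 1 := by
          simp [Ne.symm hx]
        simp [hm, hx, this]
        ring
      · simp [hm, hx]

theorem pvF_keys (ws : List String) (n : Int) :
    (pvF ws n).keys = PySem.Set.ofList ws.reverse := by
  have h := PySem.Dict.keys_foldl_insert_key ((PySem.List.enumerate ws n).reverse)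
      (fun p : Int × String => p.2) (fun d p => p.1) PySem.Dict.empty
  simpa [pvF, PySem.Dict.keys_empty, PySem.Set.update_nil_left, List.map_reverse,
    PySem.List.map_snd_enumerate] using h

-- first-occurrence indices increase along the ordered dedup
theorem pvPairwise (ws : List String) :
    (PySem.Set.ofList ws).Pairwise (fun a b => ws.idxOf a < ws.idxOf b) := by
  induction ws with
  | nil => simp [PySem.Set.ofList]
  | cons w ws ih =>
    rw [PySem.Set.ofList_cons, List.pairwise_cons]
    constructor
    · intro b hb
      obtain ⟨hbm, hbw⟩ := (PySem.Set.mem_discard _ _ _).mp hb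
      have hbw' : b ≠ w := hbw
      simp [List.idxOf_cons_self, Ne.symm hbw']
    · have hsub : List.Sublist (PySem.Set.discard (PySem.Set.ofList ws) w) (PySem.Set.ofList ws) := by
        simp [PySem.Set.discard]
      have hp := ih.sublist hsub
      refine List.Pairwise.imp_of_mem ?_ hp
      intro a b ha hb hab
      have haw : a ≠ w := ((PySem.Set.mem_discard _ _ _).mp ha).2
      have hbw : b ≠ w := ((PySem.Set.mem_discard _ _ _).mp hb).2
      simp [Ne.symm haw, Ne.symm hbw]
      omega

theorem pvOrder (ws : List String) :
    PySem.List.sorted (pvF ws 0).keys (fun x => ((pvF ws 0).get? x).getD 0) false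
      = PySem.List.dedup ws := by
  apply PySem.List.sorted_eq_of_perm_of_pairwise_lt
  · rw [pvF_keys, PySem.List.dedup_eq_ofList]
    refine (List.perm_ext_iff_of_nodup (PySem.Set.nodup_ofList _) (PySem.Set.nodup_ofList _)).mpr ?_
    intro a
    simp [PySem.Set.mem_ofList]
  · rw [PySem.List.dedup_eq_ofList]
    refine List.Pairwise.imp_of_mem ?_ (pvPairwise ws)
    intro a b ha hb hab
    have ham : a ∈ ws := (PySem.Set.mem_ofList _ _).mp ha
    have hbm : b ∈ ws := (PySem.Set.mem_ofList _ _).mp hb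
    rw [pvF_get?, pvF_get?, if_pos ham, if_pos hbm]
    simpa using hab

-- ===== VERDICT (by name: the statement is the Claim_ definition above) =====
theorem vocab_to_indices_spec : Claim_equal_vocab_to_indices := by
  intro corpus _
  show vocab_to_indices corpus = vocab_to_indices_alt corpus
  unfold vocab_to_indices vocab_to_indices_alt
  have hA : (fun (st : PySem.Dict String Int × Int) (word : String) =>
      if st.1.contains word then st else (st.1.insert word st.2, st.2 + 1)) = pvStep := rfl
  simp only [hA]
  have hempty : ((PySem.Dict.empty : PySem.Dict String Int), (0 : Int))
      = (pvD [], (([] : List String).length : Int)) := by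
    simp [pvD, PySem.Dict.empty, PySem.List.enumerate]
  rw [hempty, pvFold_flatten, pvFold_invariant, PySem.Set.update_nil_left]
  have hfold : ∀ ws : List String,
      ((PySem.List.enumerate ws 0).reverse).foldl
        (fun d p => d.insert p.2 p.1) (PySem.Dict.empty : PySem.Dict String Int) = pvF ws 0 :=
    fun ws => rfl
  rw [hfold, pvOrder]
  simp [pvD, PySem.List.dedup_eq_ofList]
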